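-- pv_equiv track=rewrite | github.com/daniel-reich/ubiquitous-fiesta | qKBfL9pQBaqXvKTfW_3.py | sum_of_slices
-- ===== SOURCE A (Python) =====
-- def sum_of_slices(lst):
--     if lst[0] > 100:
--         res = [0, lst[0]]
--         lst = lst[1:]
--     else:
--         res = []
--     while sum(lst) > 100:
--         while lst and lst[0] >= 100:
--             res.append(lst[0])
--             lst = lst[1:]
--         if not lst:
--             break
--         i = 1
--         while sum(lst[:i]) < 100:
--             i += 1
--         res.append(sum(lst[: i - 1]))
--         lst = lst[i - 1:]
--     if lst:
--         res.append(sum(lst))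
--     return res
-- ===== SOURCE B (Python) =====
-- def sum_of_slices(lst):
--     n = len(lst)
--     res = []
--     idx = 0
--     if lst[0] > 100:
--         res = [0, lst[0]]
--         idx = 1
--     remaining = sum(lst[idx:])
--     while remaining > 100:
--         while idx < n and lst[idx] >= 100:
--             res.append(lst[idx])
--             remaining -= lst[idx]
--             idx += 1
--         if idx == n:
--             break
--         chunk = 0
--         while chunk + lst[idx] < 100:
--             chunk += lst[idx]
--             remaining -= lst[idx]
--             idx += 1
--         res.append(chunk)
--     if idx < n:
--         res.append(remaining)
--     return res
-- ===== Notes on version B (the rewrite author's own statement) =====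
-- stated objective: alternative
-- what changed: B replaces A's repeated list slicing and whole-slice re-summations (sum(lst) and sum(lst[:i]) recomputed from scratch at every step) with a single index pointer and running remaining/chunk sums.
-- outside the precondition, e.g. on sum_of_slices([100, 50]): A does not finish within the time limit, B raises IndexError; on sum_of_slices([-50, 100, 5, 60]): A returns [55, 60], B returns [55, 60]; on sum_of_slices([90, 20, 100, -50]): A returns [90, 70], B returns [90, 70]
import Mathlib
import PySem

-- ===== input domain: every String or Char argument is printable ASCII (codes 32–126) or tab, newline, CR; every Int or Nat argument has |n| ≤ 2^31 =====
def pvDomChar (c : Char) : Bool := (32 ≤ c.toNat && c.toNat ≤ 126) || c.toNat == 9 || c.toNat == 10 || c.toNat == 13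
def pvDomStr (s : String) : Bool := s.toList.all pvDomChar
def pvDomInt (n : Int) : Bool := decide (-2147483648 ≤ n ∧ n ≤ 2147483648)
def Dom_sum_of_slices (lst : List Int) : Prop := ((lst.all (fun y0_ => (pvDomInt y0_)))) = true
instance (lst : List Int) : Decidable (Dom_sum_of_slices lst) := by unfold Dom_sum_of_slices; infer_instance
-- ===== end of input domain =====

-- B replaces A's repeated list slicing and whole-slice re-summations by one index pointer with
-- running remaining/chunk sums (same greedy packing); equivalence is claimed on Pre_ below.

-- ===== PORT A =====
-- `i = 1; while sum(lst[:i]) < 100: i += 1` — fuel lst.length+1 suffices whenever the Python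
-- loop terminates (sum(lst[:i]) clamps at i = len); on fuel-out Python diverges (outside Pre_).
def findA (lst : List Int) (i : Nat) (fuel : Nat) : Nat :=
  match fuel with
  | 0 => i
  | f + 1 => if (lst.take i).sum < 100 then findA lst (i + 1) f else i

-- `while lst and lst[0] >= 100: res.append(lst[0]); lst = lst[1:]`
def stripA (res lst : List Int) : List Int × List Int :=
  match lst with
  | [] => (res, [])
  | x :: rest => if x ≥ 100 then stripA (res ++ [x]) rest else (res, x :: rest)

-- `while sum(lst) > 100: ...` — each terminating Python iteration drops ≥ 1 element, so fuel
-- lst.length+1 suffices; on fuel-out Python diverges (outside Pre_).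
def loopA (res lst : List Int) (fuel : Nat) : List Int × List Int :=
  match fuel with
  | 0 => (res, lst)
  | f + 1 =>
    if lst.sum > 100 then
      match stripA res lst with
      | (res1, lst1) =>
        if lst1 = [] then (res1, lst1)
        else
          let i := findA lst1 1 (lst1.length + 1)
          loopA (res1 ++ [(lst1.take (i - 1)).sum]) (lst1.drop (i - 1)) f
    else (res, lst)

def sum_of_slices (lst : List Int) : List Int :=
  -- `if lst[0] > 100:` — lst[0] on [] raises IndexError (outside Pre_); lst[1:] is drop 1
  match PySem.List.pyGet? lst 0 with
  | none => []
  | some h =>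
    let (res0, lst0) := if h > 100 then (([0, h] : List Int), lst.drop 1) else ([], lst)
    match loopA res0 lst0 (lst0.length + 1) with
    | (res1, lst1) => res1 ++ (if lst1 = [] then [] else [lst1.sum])

-- ===== PORT B =====
-- `while idx < n and lst[idx] >= 100: ...` — lst.getD idx 0 = lst[idx], exact since idx < n
def stripB (lst res : List Int) (remaining : Int) (idx n : Nat) (fuel : Nat) :
    List Int × Int × Nat :=
  match fuel with
  | 0 => (res, remaining, idx)
  | f + 1 =>
    if idx < n ∧ 100 ≤ lst.getD idx 0 then
      stripB lst (res ++ [lst.getD idx 0]) (remaining - lst.getD idx 0) (idx + 1) n f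
    else (res, remaining, idx)

-- `chunk = 0; while chunk + lst[idx] < 100: ...` — Python raises IndexError at idx = n only on
-- inputs outside Pre_; fuel n-idx+1 suffices inside Pre_
def chunkB (lst : List Int) (chunk remaining : Int) (idx : Nat) (fuel : Nat) :
    Int × Int × Nat :=
  match fuel with
  | 0 => (chunk, remaining, idx)
  | f + 1 =>
    if chunk + lst.getD idx 0 < 100 then
      chunkB lst (chunk + lst.getD idx 0) (remaining - lst.getD idx 0) (idx + 1) f
    else (chunk, remaining, idx)

-- `while remaining > 100: ...` — idx advances ≥ 1 per iteration, fuel n-idx+1 suffices inside Pre_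
def loopB (lst res : List Int) (remaining : Int) (idx n : Nat) (fuel : Nat) :
    List Int × Int × Nat :=
  match fuel with
  | 0 => (res, remaining, idx)
  | f + 1 =>
    if remaining > 100 then
      match stripB lst res remaining idx n (n - idx) with
      | (res1, rem1, idx1) =>
        if idx1 = n then (res1, rem1, idx1)
        else
          match chunkB lst 0 rem1 idx1 (n - idx1 + 1) with
          | (c, rem2, idx2) => loopB lst (res1 ++ [c]) rem2 idx2 n f
    else (res, remaining, idx)

def sum_of_slices_alt (lst : List Int) : List Int :=
  match PySem.List.pyGet? lst 0 with
  | none => []   -- Python: lst[0] raises IndexError (outside Pre_)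
  | some h =>
    let n := lst.length
    let (res0, idx0) := if h > 100 then (([0, h] : List Int), 1) else (([] : List Int), 0)
    let remaining := (lst.drop idx0).sum   -- sum(lst[idx:])
    match loopB lst res0 remaining idx0 n (n - idx0 + 1) with
    | (res1, rem1, idx1) => res1 ++ (if idx1 < n then [rem1] else [])

-- ===== PRECONDITION & SPEC =====
-- Pre_ excludes the empty list (lst[0] raises IndexError) and the inputs on which A can diverge:
-- after the initially dropped >100 head, A's loop list sums over 100 and some element ≥ 100 is
-- directly followed by an element < 100 starting a tail that sums under 100 — when A's stripping
-- loop stops at such a place, the prefix search `while sum(lst[:i]) < 100` loops forever.  This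
-- boundary condition slightly over-approximates the true divergence region, so it also excludes
-- a few inputs on which A returns (the bad boundary is exited before or jumped over, which needs
-- negative elements or an early loop exit); see the cited excluded examples, where B agrees with A.
def Pre_sum_of_slices (lst : List Int) : Prop :=
  lst ≠ [] ∧
  ((lst.drop (if 100 < lst.headI then 1 else 0)).sum ≤ 100 ∨
    ∀ m ∈ List.range lst.length,
      (if 100 < lst.headI then 1 else 0) + 1 ≤ m →
      100 ≤ lst.getD (m - 1) 0 → lst.getD m 0 < 100 → 100 ≤ (lst.drop m).sum)

instance (lst : List Int) : Decidable (Pre_sum_of_slices lst) := by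
  unfold Pre_sum_of_slices; infer_instance

def pvWitness_sum_of_slices : List Int := [150, 40, 70, 30, -5, 60]

def Spec_sum_of_slices (lst : List Int) (out : List Int) : Prop := out = sum_of_slices_alt lst
instance (lst : List Int) (out : List Int) : Decidable (Spec_sum_of_slices lst out) := by
  unfold Spec_sum_of_slices; infer_instance

-- ===== CLAIM (what is proved, stated in full; the proofs are below) =====
def Claim_equal_sum_of_slices : Prop :=
  ∀ (lst : List Int), Dom_sum_of_slices lst → Pre_sum_of_slices lst →
    Spec_sum_of_slices lst (sum_of_slices lst)

-- ===== LEMMAS AND PROOFS =====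

-- prefix-sum step: sum of a (j+1)-prefix is sum of the j-prefix plus the j-th element (0 past end)
lemma take_succ_sum (L : List Int) (j : Nat) :
    (L.take (j + 1)).sum = (L.take j).sum + L.getD j 0 := by
  induction L generalizing j with
  | nil => simp [List.getD]
  | cons x t ih =>
    cases j with
    | zero => simp [List.getD]
    | succ j =>
      simp only [List.take_succ_cons, List.sum_cons, ih, List.getD_cons_succ]
      ring

lemma getD_drop (lst : List Int) (idx j : Nat) :
    (lst.drop idx).getD j 0 = lst.getD (idx + j) 0 := by
  simp [List.getD_eq_getElem?_getD, List.getElem?_drop]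

-- B's chunk scan computes exactly the slice sum that A's findA search describes
lemma chunk_find (f : Nat) (lst : List Int) (idx : Nat) :
    ∀ (j : Nat) (rem : Int),
      chunkB lst ((lst.drop idx).take j).sum rem (idx + j) f =
        (((lst.drop idx).take (findA (lst.drop idx) (j + 1) f - 1)).sum,
         rem - (((lst.drop idx).take (findA (lst.drop idx) (j + 1) f - 1)).sum
                - ((lst.drop idx).take j).sum),
         idx + (findA (lst.drop idx) (j + 1) f - 1)) := by
  induction f with
  | zero => intro j rem; simp [chunkB, findA]
  | succ f ih =>
    intro j rem
    have hx : lst.getD (idx + j) 0 = (lst.drop idx).getD j 0 := (getD_drop lst idx j).symm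
    have hsum : ((lst.drop idx).take (j + 1)).sum
        = ((lst.drop idx).take j).sum + lst.getD (idx + j) 0 := by
      rw [take_succ_sum, hx]
    by_cases hc : ((lst.drop idx).take (j + 1)).sum < 100
    · have hc' : ((lst.drop idx).take j).sum + lst.getD (idx + j) 0 < 100 := by
        rw [← hsum]; exact hc
      have := ih (j + 1) (rem - lst.getD (idx + j) 0)
      simp only [chunkB, findA, if_pos hc, if_pos hc']
      rw [show idx + j + 1 = idx + (j + 1) by ring, ← hsum, this, hsum]
      simp only [Prod.mk.injEq]
      refine ⟨by trivial, by ring, by trivial⟩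
    · have hc' : ¬ (((lst.drop idx).take j).sum + lst.getD (idx + j) 0 < 100) := by
        rw [← hsum]; exact hc
      rw [chunkB, findA, if_neg hc, if_neg (by simpa [List.getD_eq_getElem?_getD] using hc')]
      simp

-- when the list sums to ≥ 100 the prefix search never runs past the end
lemma findA_le (L : List Int) (hs : 100 ≤ L.sum) :
    ∀ (f j : Nat), findA L j f ≤ max j L.length := by
  intro f
  induction f with
  | zero => intro j; simp [findA]
  | succ f ih =>
    intro j
    by_cases hc : (L.take j).sum < 100
    · have hj : j < L.length := by
        by_contra h
        rw [List.take_of_length_le (by omega)] at hc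
        omega
      calc findA L j (f + 1) = findA L (j + 1) f := by rw [findA, if_pos hc]
        _ ≤ max (j + 1) L.length := ih (j + 1)
        _ ≤ max j L.length := by omega
    · rw [findA, if_neg hc]; omega

-- strip correspondence: B's pointer strip tracks A's slicing strip, ending at the first
-- position idx2 ≥ idx whose element is < 100 (or at the end of the list)
lemma strip_corr (f : Nat) (lst : List Int) :
    ∀ (idx : Nat) (res : List Int), f = lst.length - idx → idx ≤ lst.length →
    ∃ res2 idx2, idx ≤ idx2 ∧ idx2 ≤ lst.length ∧
      stripB lst res ((lst.drop idx).sum) idx lst.length f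
          = (res2, (lst.drop idx2).sum, idx2) ∧
      stripA res (lst.drop idx) = (res2, lst.drop idx2) ∧
      (idx2 < lst.length → lst.getD idx2 0 < 100) ∧
      (idx < idx2 → 100 ≤ lst.getD (idx2 - 1) 0) := by
  induction f with
  | zero =>
    intro idx res hf hle
    have hidx : idx = lst.length := by omega
    refine ⟨res, idx, le_refl _, hle, ?_, ?_, by omega, by omega⟩
    · simp [stripB]
    · rw [hidx, List.drop_length]; rfl
  | succ f ih =>
    intro idx res hf hle
    have hidx : idx < lst.length := by omega
    have hx : lst.getD idx 0 = lst[idx] := by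
      simp [List.getD_eq_getElem?_getD, List.getElem?_eq_getElem hidx]
    have hdrop : lst.drop idx = lst[idx] :: lst.drop (idx + 1) :=
      List.drop_eq_getElem_cons hidx
    by_cases h100 : 100 ≤ lst[idx]
    · -- stripped
      have hrem : (lst.drop idx).sum - lst.getD idx 0 = (lst.drop (idx + 1)).sum := by
        rw [hdrop, hx, List.sum_cons]; ring
      obtain ⟨res2, idx2, h1, h2, hB, hA, h5, h6⟩ :=
        ih (idx + 1) (res ++ [lst.getD idx 0]) (by omega) (by omega)
      refine ⟨res2, idx2, by omega, h2, ?_, ?_, h5, ?_⟩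
      · rw [stripB, if_pos ⟨hidx, by omega⟩, hrem]; exact hB
      · rw [hdrop, stripA, if_pos h100, ← hx]
        rw [hdrop] at hrem
        exact hA
      · intro _
        by_cases he : idx + 1 < idx2
        · exact h6 he
        · have : idx2 = idx + 1 := by omega
          rw [this, Nat.add_sub_cancel, hx]; exact h100
    · -- strip stops here
      refine ⟨res, idx, le_refl _, by omega, ?_, ?_, fun _ => by rw [hx]; omega, by omega⟩
      · rw [stripB, if_neg (by rw [hx]; rintro ⟨_, h⟩; omega)]
      · rw [hdrop, stripA, if_neg h100]

-- the main loop correspondence, under the boundary-safety part of Pre_: B's pointer loop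
-- tracks A's slicing loop (same residue as a suffix, same result, remaining = suffix sum)
lemma loop_corr (s : Nat) (lst : List Int)
    (hSafe : ∀ m : Nat, m < lst.length → s + 1 ≤ m → 100 ≤ lst.getD (m - 1) 0 →
      lst.getD m 0 < 100 → 100 ≤ (lst.drop m).sum) (f : Nat) :
    ∀ (idx : Nat) (res : List Int), s ≤ idx → idx ≤ lst.length →
    ∃ res2 idx2, idx2 ≤ lst.length ∧
      loopB lst res ((lst.drop idx).sum) idx lst.length f
          = (res2, (lst.drop idx2).sum, idx2) ∧
      loopA res (lst.drop idx) f = (res2, lst.drop idx2) := by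
  induction f with
  | zero => intro idx res _ hle; exact ⟨res, idx, hle, by simp [loopA, loopB]⟩
  | succ f ih =>
    intro idx res hs hle
    by_cases hgt : (lst.drop idx).sum > 100
    · obtain ⟨res1, idx1, hii, hi1, hB1, hA1, hlt100, hprev⟩ :=
        strip_corr (lst.length - idx) lst idx res rfl hle
      by_cases hend : idx1 = lst.length
      · -- everything stripped: A breaks, B stops at idx1 = n
        refine ⟨res1, idx1, hi1, ?_, ?_⟩
        · rw [loopB, if_pos hgt, hB1]
          dsimp only
          rw [if_pos hend]
        · rw [loopA, if_pos hgt, hA1]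
          dsimp only
          rw [if_pos (by rw [hend, List.drop_length])]
      · have hi1' : idx1 < lst.length := by omega
        have hne : lst.drop idx1 ≠ [] := by
          simp [List.drop_eq_nil_iff]; omega
        -- residue sum at idx1 is ≥ 100: either no strip happened (sum > 100) or Safe applies
        have hS1 : 100 ≤ (lst.drop idx1).sum := by
          by_cases hstep : idx < idx1
          · exact hSafe idx1 hi1' (by omega) (hprev hstep) (hlt100 hi1')
          · have : idx1 = idx := by omega
            rw [this]; omega
        set r := lst.drop idx1 with hr
        have hrlen : r.length = lst.length - idx1 := by simp [hr]
        set i := findA r 1 (r.length + 1) with hi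
        have hfuel : lst.length - idx1 + 1 = r.length + 1 := by omega
        have hchunk := chunk_find (r.length + 1) lst idx1 0 (r.sum)
        simp only [Nat.add_zero, List.take_zero, List.sum_nil, Int.sub_zero, ← hr, ← hi]
          at hchunk
        have hile : i ≤ r.length := by
          have := findA_le r hS1 (r.length + 1) 1
          have hr1 : 1 ≤ r.length := by omega
          omega
        have hdd : r.drop (i - 1) = lst.drop (idx1 + (i - 1)) := by
          rw [hr, List.drop_drop, Nat.add_comm]
        have hrem : r.sum - (r.take (i - 1)).sum = (lst.drop (idx1 + (i - 1))).sum := by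
          rw [← hdd, ← List.sum_take_add_sum_drop r (i - 1)]; ring
        obtain ⟨res2, idx2, h2le, hB2, hA2⟩ :=
          ih (idx1 + (i - 1)) (res1 ++ [(r.take (i - 1)).sum]) (by omega) (by omega)
        refine ⟨res2, idx2, h2le, ?_, ?_⟩
        · rw [loopB, if_pos hgt, hB1]
          dsimp only
          rw [if_neg hend, hfuel, hchunk]
          dsimp only
          rw [hrem]
          exact hB2
        · rw [loopA, if_pos hgt, hA1]
          dsimp only
          rw [if_neg hne, ← hi, hdd]
          exact hA2
    · refine ⟨res, idx, hle, ?_, ?_⟩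
      · rw [loopB, if_neg hgt]
      · rw [loopA, if_neg hgt]

-- both final assemblies agree given the loop correspondence state
lemma final_eq (lst resO : List Int) (idx2 : Nat) :
    resO ++ (if lst.drop idx2 = [] then [] else [(lst.drop idx2).sum])
      = resO ++ (if idx2 < lst.length then [(lst.drop idx2).sum] else []) := by
  by_cases h : idx2 < lst.length
  · rw [if_pos h, if_neg (by simp [List.drop_eq_nil_iff]; omega)]
  · rw [if_neg h, if_pos (by simp [List.drop_eq_nil_iff]; omega)]

-- ===== VERDICT (by name: the statement is the Claim_ definition above) =====
theorem sum_of_slices_spec : Claim_equal_sum_of_slices := by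
  intro lst _hdom hpre
  obtain ⟨hne, hdisj⟩ := hpre
  obtain ⟨h, t, rfl⟩ := List.exists_cons_of_ne_nil hne
  show sum_of_slices (h :: t) = sum_of_slices_alt (h :: t)
  have hget : PySem.List.pyGet? (h :: t) 0 = some h := by
    simp [PySem.List.pyGet?, PySem.List.pyIdx?]
  have hhead : (h :: t).headI = h := rfl
  by_cases hgt : h > 100
  · -- head dropped before the loop; loop runs on drop 1 = t, offset s = 1
    rw [hhead] at hdisj
    simp only [if_pos hgt] at hdisj
    have hfuelA : ((h :: t).drop 1).length + 1 = t.length + 1 := by simp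
    have hfuelB : (h :: t).length - 1 + 1 = t.length + 1 := by simp
    rcases hdisj with hsum | hsafe
    · -- loop never entered
      have hngt : ¬ (((h :: t).drop 1).sum > 100) := by omega
      simp only [sum_of_slices, sum_of_slices_alt, hget, if_pos hgt]
      simp only [hfuelA, hfuelB]
      rw [loopA, if_neg hngt, loopB, if_neg hngt]
      exact final_eq (h :: t) [0, h] 1
    · obtain ⟨res2, idx2, h2le, hB, hA⟩ :=
        loop_corr 1 (h :: t)
          (fun m hm h1 hp hc => hsafe m (List.mem_range.mpr hm) h1 hp hc)
          (t.length + 1) 1 [0, h] (le_refl 1) (by simp)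
      simp only [sum_of_slices, sum_of_slices_alt, hget, if_pos hgt]
      simp only [hfuelA, hfuelB, hA, hB]
      exact final_eq (h :: t) res2 idx2
  · -- whole list is the loop list, offset s = 0
    rw [hhead] at hdisj
    simp only [if_neg hgt, List.drop_zero] at hdisj
    have hfuelB : (h :: t).length - 0 + 1 = (h :: t).length + 1 := by simp
    rcases hdisj with hsum | hsafe
    · have hngt : ¬ ((h :: t).sum > 100) := by omega
      simp only [sum_of_slices, sum_of_slices_alt, hget, if_neg hgt]
      simp only [List.drop_zero, hfuelB]
      rw [loopA, if_neg hngt, loopB, if_neg hngt]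
      have := final_eq (h :: t) [] 0
      simp only [List.drop_zero] at this
      exact this
    · obtain ⟨res2, idx2, h2le, hB, hA⟩ :=
        loop_corr 0 (h :: t)
          (fun m hm h1 hp hc => hsafe m (List.mem_range.mpr hm) h1 hp hc)
          ((h :: t).length + 1) 0 [] (Nat.zero_le 0) (Nat.zero_le _)
      rw [List.drop_zero] at hA hB
      simp only [sum_of_slices, sum_of_slices_alt, hget, if_neg hgt]
      simp only [List.drop_zero, hfuelB, hA, hB]
      exact final_eq (h :: t) res2 idx2
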